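-- pv_equiv track=rewrite | github.com/Ghostkey316/theloopbreaker.com | vaultfire/protocol/mission_covenant.py | _normalise_commitments
-- ===== SOURCE A (Python) =====
-- from typing import Dict, Iterable, Mapping, MutableMapping, Tuple
--
-- def _normalise_commitments(commitments: Iterable[str] | None) -> Tuple[str, ...]:
--     if commitments is None:
--         return tuple()
--     unique = []
--     seen = set()
--     for item in commitments:
--         if not isinstance(item, str):
--             continue
--         value = item.strip()
--         if not value or value in seen:
--             continue
--         seen.add(value)
--         unique.append(value)
--     return tuple(sorted(unique))
-- ===== SOURCE B (Python) =====
-- def _normalise_commitments(commitments):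
--     if commitments is None:
--         return tuple()
--     kept = []
--     for item in commitments:
--         if not isinstance(item, str):
--             continue
--         value = item.strip()
--         if value:
--             kept.append(value)
--     kept.sort()
--     out = []
--     for value in kept:
--         if not out or out[-1] != value:
--             out.append(value)
--     return tuple(out)
-- ===== Notes on version B (the rewrite author's own statement) =====
-- stated objective: alternative
-- what changed: Instead of deduplicating on the fly with a 'seen' set during collection and sorting at the end, B collects all stripped non-empty values with duplicates, sorts the list, and removes duplicates in a final linear pass comparing each value to the last emitted one.
import Mathlib
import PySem

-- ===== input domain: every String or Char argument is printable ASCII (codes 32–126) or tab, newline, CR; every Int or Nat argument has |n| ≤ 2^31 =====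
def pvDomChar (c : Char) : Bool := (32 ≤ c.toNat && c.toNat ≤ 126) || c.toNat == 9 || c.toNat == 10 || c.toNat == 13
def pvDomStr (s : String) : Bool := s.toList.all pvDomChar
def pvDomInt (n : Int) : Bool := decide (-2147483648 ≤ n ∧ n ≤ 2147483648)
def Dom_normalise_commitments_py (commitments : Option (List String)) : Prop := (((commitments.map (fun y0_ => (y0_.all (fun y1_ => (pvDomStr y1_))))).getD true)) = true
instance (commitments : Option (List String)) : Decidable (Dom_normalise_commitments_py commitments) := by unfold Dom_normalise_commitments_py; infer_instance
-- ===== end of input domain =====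

-- B collects stripped non-empty values with duplicates, sorts, and dedupes in one
-- final adjacent-comparison pass, instead of A's on-the-fly 'seen'-set dedup; same cost.

-- ===== PORT A =====
-- (the 'isinstance(item, str)' guard is always true on the typed domain List String)
def normalise_commitments_py (commitments : Option (List String)) : List String :=
  match commitments with
  | none => []
  | some xs =>
    let st := xs.foldl (fun (st : List String × PySem.Set String) item =>
      if PySem.Str.strip item = "" ∨ PySem.Set.contains st.2 (PySem.Str.strip item) then st
      else (st.1 ++ [PySem.Str.strip item], PySem.Set.add st.2 (PySem.Str.strip item)))
      ([], PySem.Set.empty)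
    PySem.List.sorted st.1 (fun x => x) false

-- ===== PORT B =====
def normalise_commitments_py_alt (commitments : Option (List String)) : List String :=
  match commitments with
  | none => []
  | some xs =>
    let kept := xs.foldl (fun acc item =>
      if PySem.Str.strip item = "" then acc else acc ++ [PySem.Str.strip item]) []
    let skept := PySem.List.sorted kept (fun x => x) false
    skept.foldl (fun out value =>
      if out = [] ∨ out.getLast? ≠ some value then out ++ [value] else out) []

-- ===== PRECONDITION & SPEC =====
def Spec_normalise_commitments_py (commitments : Option (List String)) (out : List String) : Prop := out = normalise_commitments_py_alt commitments
instance (commitments : Option (List String)) (out : List String) : Decidable (Spec_normalise_commitments_py commitments out) := by unfold Spec_normalise_commitments_py; infer_instance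

-- ===== CLAIM (what is proved, stated in full; the proofs are below) =====
def Claim_equal_normalise_commitments_py : Prop := ∀ (commitments : Option (List String)), Dom_normalise_commitments_py commitments → Spec_normalise_commitments_py commitments (normalise_commitments_py commitments)

-- ===== LEMMAS AND PROOFS =====

/-- The stripped non-empty values, in order. -/
def pvVals (xs : List String) : List String :=
  (xs.map PySem.Str.strip).filter (fun v => v ≠ "")

theorem pvVals_cons_empty (x : String) (t : List String) (h0 : PySem.Str.strip x = "") :
    pvVals (x :: t) = pvVals t := by
  simp [pvVals, h0]

theorem pvVals_cons (x : String) (t : List String) (h0 : ¬ PySem.Str.strip x = "") :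
    pvVals (x :: t) = PySem.Str.strip x :: pvVals t := by
  simp [pvVals, h0]

theorem pvFoldA (xs : List String) (s : PySem.Set String) :
    xs.foldl (fun (st : List String × PySem.Set String) item =>
      if PySem.Str.strip item = "" ∨ PySem.Set.contains st.2 (PySem.Str.strip item) then st
      else (st.1 ++ [PySem.Str.strip item], PySem.Set.add st.2 (PySem.Str.strip item)))
      (s, s)
    = ((pvVals xs).foldl PySem.Set.add s, (pvVals xs).foldl PySem.Set.add s) := by
  induction xs generalizing s with
  | nil => rfl
  | cons x t ih =>
    simp only [List.foldl_cons]
    by_cases h0 : PySem.Str.strip x = ""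
    · rw [if_pos (Or.inl h0), pvVals_cons_empty x t h0]
      exact ih s
    · by_cases hc : PySem.Set.contains s (PySem.Str.strip x)
      · rw [if_pos (Or.inr hc), pvVals_cons x t h0, List.foldl_cons]
        have hm : PySem.Str.strip x ∈ s := by rw [← PySem.Set.contains_iff]; exact hc
        have hadd : PySem.Set.add s (PySem.Str.strip x) = s := PySem.Set.add_of_mem hm
        rw [hadd]
        exact ih s
      · have hnm : PySem.Str.strip x ∉ s := by
          intro hm; exact hc (by rw [PySem.Set.contains_iff]; exact hm)
        rw [if_neg (by simp [h0, hnm]), pvVals_cons x t h0, List.foldl_cons]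
        have hadd : PySem.Set.add s (PySem.Str.strip x) = s ++ [PySem.Str.strip x] :=
          PySem.Set.add_of_not_mem hnm
        rw [show (s ++ [PySem.Str.strip x], PySem.Set.add s (PySem.Str.strip x))
              = ((PySem.Set.add s (PySem.Str.strip x) : List String),
                 PySem.Set.add s (PySem.Str.strip x)) by rw [hadd]]
        exact ih (PySem.Set.add s (PySem.Str.strip x))

theorem pvFoldKept (xs acc : List String) :
    xs.foldl (fun acc item =>
      if PySem.Str.strip item = "" then acc else acc ++ [PySem.Str.strip item]) acc
    = acc ++ pvVals xs := by
  induction xs generalizing acc with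
  | nil => simp [pvVals]
  | cons x t ih =>
    simp only [List.foldl_cons]
    by_cases h0 : PySem.Str.strip x = ""
    · rw [if_pos h0, pvVals_cons_empty x t h0]; exact ih acc
    · rw [if_neg h0, pvVals_cons x t h0, ih (acc ++ [PySem.Str.strip x])]
      simp

/-- Adjacent dedup of `a :: l`, recursively. -/
def pvAdj (a : String) : List String → List String
  | [] => [a]
  | x :: t => if a = x then pvAdj a t else a :: pvAdj x t

theorem pvFoldB (l : List String) (acc : List String) (a : String) :
    l.foldl (fun out value =>
      if out = [] ∨ out.getLast? ≠ some value then out ++ [value] else out) (acc ++ [a])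
    = acc ++ pvAdj a l := by
  induction l generalizing acc a with
  | nil => simp [pvAdj]
  | cons x t ih =>
    simp only [List.foldl_cons, pvAdj]
    by_cases hax : a = x
    · subst hax
      rw [if_neg (by simp [List.getLast?_append]), if_pos rfl]
      exact ih acc a
    · rw [if_pos (by right; simp [List.getLast?_append, hax]), if_neg hax,
        ih (acc ++ [a]) x]
      simp

theorem pvMemAdj (l : List String) (a y : String) :
    y ∈ pvAdj a l ↔ y = a ∨ y ∈ l := by
  induction l generalizing a with
  | nil => simp [pvAdj]
  | cons x t ih =>
    by_cases hax : a = x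
    · subst hax
      rw [show pvAdj a (a :: t) = pvAdj a t from if_pos rfl, ih]
      simp only [List.mem_cons]
      tauto
    · rw [show pvAdj a (x :: t) = a :: pvAdj x t from if_neg hax]
      simp only [List.mem_cons, ih]

theorem pvAdjPairwise (l : List String) (a : String)
    (h : (a :: l).Pairwise (· ≤ ·)) : (pvAdj a l).Pairwise (· < ·) := by
  induction l generalizing a with
  | nil => simp [pvAdj]
  | cons x t ih =>
    rw [List.pairwise_cons] at h
    obtain ⟨ha, hxt⟩ := h
    by_cases hax : a = x
    · subst hax
      rw [show pvAdj a (a :: t) = pvAdj a t from if_pos rfl]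
      exact ih a (List.pairwise_cons.mpr
        ⟨fun y hy => ha y (List.mem_cons_of_mem _ hy), (List.pairwise_cons.mp hxt).2⟩)
    · rw [show pvAdj a (x :: t) = a :: pvAdj x t from if_neg hax]
      have halx : a < x := lt_of_le_of_ne (ha x (List.mem_cons_self ..)) hax
      refine List.pairwise_cons.mpr ⟨?_, ih x hxt⟩
      intro y hy
      rcases (pvMemAdj t x y).mp hy with h1 | h2
      · exact h1 ▸ halx
      · exact lt_of_lt_of_le halx ((List.pairwise_cons.mp hxt).1 y h2)

-- ===== VERDICT (by name: the statement is the Claim_ definition above) =====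
theorem normalise_commitments_py_spec : Claim_equal_normalise_commitments_py := by
  intro commitments _
  unfold Spec_normalise_commitments_py normalise_commitments_py normalise_commitments_py_alt
  cases commitments with
  | none => rfl
  | some xs =>
    simp only
    rw [show (([] : List String), (PySem.Set.empty : PySem.Set String))
          = ((PySem.Set.empty : PySem.Set String), (PySem.Set.empty : PySem.Set String)) from rfl,
        pvFoldA xs PySem.Set.empty, pvFoldKept xs [], List.nil_append]
    have hofl : (pvVals xs).foldl PySem.Set.add PySem.Set.empty = PySem.Set.ofList (pvVals xs) := by
      rw [PySem.Set.ofList_eq_foldl]; rfl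
    rw [hofl]
    rcases hs : PySem.List.sorted (pvVals xs) (fun x => x) false with _ | ⟨a, t⟩
    · have h0 : pvVals xs = [] := (PySem.List.sorted_eq_nil_iff _ _ _).mp hs
      simp [h0, PySem.Set.ofList, PySem.List.sorted]
    · have hB : (a :: t).foldl (fun out value =>
          if out = [] ∨ out.getLast? ≠ some value then out ++ [value] else out) []
          = pvAdj a t := by
        simp only [List.foldl_cons]
        rw [if_pos (Or.inl (by trivial))]
        exact (pvFoldB t [] a).trans (by simp)
      rw [hB]
      have hple : (a :: t).Pairwise (· ≤ ·) := by
        have := PySem.List.sorted_pairwise (xs := pvVals xs) (key := fun x => x)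
        rwa [hs] at this
      have hlt : (pvAdj a t).Pairwise (· < ·) := pvAdjPairwise t a hple
      have hnd1 : (pvAdj a t).Nodup := hlt.imp (fun h => ne_of_lt h)
      have hperm : (pvAdj a t).Perm (PySem.Set.ofList (pvVals xs)) := by
        rw [List.perm_ext_iff_of_nodup hnd1 (PySem.Set.nodup_ofList _)]
        intro y
        rw [pvMemAdj, PySem.Set.mem_ofList]
        have hmem : y ∈ pvVals xs ↔ y ∈ a :: t := by
          rw [← hs, PySem.List.mem_sorted]
        rw [hmem]
        simp [List.mem_cons]
      exact PySem.List.sorted_eq_of_perm_of_pairwise_lt _ _ _ hperm (by simpa using hlt)
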